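-- pv_equiv track=rewrite | github.com/twilsonco/PyPhotoCollage | PhotoCollage.py | linear_partition
-- ===== SOURCE A (Python) =====
-- from operator import itemgetter
--
-- def linear_partition(seq, k, data_list = None, do_rotate = False):
--     if k <= 0:
--         return []
--     n = len(seq) - 1
--     if k > n:
--         return map(lambda x: [x], seq)
--     _, solution = linear_partition_table(seq, k)
--     k, ans = k-2, []
--     if data_list == None or len(data_list) != len(seq):
--         while k >= 0:
--             row = [[seq[i] for i in range(solution[n-1][k]+1, n+1)]]
--             if do_rotate:
--                 ans += row
--             else:
--                 ans = row + ans
--             n, k = solution[n-1][k], k-1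
--         row = [[seq[i] for i in range(0, n+1)]]
--         if do_rotate:
--             ans += row
--         else:
--             ans = row + ans
--     else:
--         while k >= 0:
--             row = [[data_list[i] for i in range(solution[n-1][k]+1, n+1)]]
--             if do_rotate:
--                 ans += row
--             else:
--                 ans = row + ans
--             n, k = solution[n-1][k], k-1
--         row = [[data_list[i] for i in range(0, n+1)]]
--         if do_rotate:
--             ans += row
--         else:
--             ans = row + ans
--     return ans
--
-- def linear_partition_table(seq, k):
--     n = len(seq)
--     table = [[0] * k for x in range(n)]
--     solution = [[0] * (k-1) for x in range(n-1)]
--     for i in range(n):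
--         table[i][0] = seq[i] + (table[i-1][0] if i else 0)
--     for j in range(k):
--         table[0][j] = seq[0]
--     for i in range(1, n):
--         for j in range(1, k):
--             table[i][j], solution[i-1][j-1] = min(
--                 ((max(table[x][j-1], table[i][0]-table[x][0]), x) for x in range(i)),
--                 key=itemgetter(0))
--     return (table, solution)
-- ===== SOURCE B (Python) =====
-- def linear_partition(seq, k, data_list=None, do_rotate=False):
--     if k <= 0:
--         return []
--     n = len(seq)
--     if k >= n:
--         return [[x] for x in seq]
--     memo = {}
--
--     def cost(i, j):
--         # minimal max block sum splitting seq[:i+1] into j+1 contiguous blocks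
--         key = (i, j)
--         got = memo.get(key)
--         if got is None:
--             if j == 0:
--                 got = sum(seq[:i + 1])
--             elif i == 0:
--                 got = seq[0]
--             else:
--                 j1 = j - 1
--                 mget = memo.get
--                 tail = sum(seq[1:i + 1])
--                 got = max(cost(0, j1), tail)
--                 for x in range(1, i):
--                     tail -= seq[x]
--                     c = mget((x, j1))
--                     if c is None:
--                         c = cost(x, j1)
--                     v = c if c > tail else tail
--                     if v < got:
--                         got = v
--             memo[key] = got
--         return got
--
--     def best_cut(i, j):
--         # first x minimizing max(cost(x, j), sum(seq[x+1:i+1]))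
--         mget = memo.get
--         tail = sum(seq[1:i + 1])
--         best, cutx = max(cost(0, j), tail), 0
--         for x in range(1, i):
--             tail -= seq[x]
--             c = mget((x, j))
--             if c is None:
--                 c = cost(x, j)
--             v = c if c > tail else tail
--             if v < best:
--                 best, cutx = v, x
--         return cutx
--
--     cut = [[best_cut(i, j) for j in range(k - 1)] for i in range(1, n)]
--     src = seq if data_list is None or len(data_list) != n else data_list
--     parts = []
--     e = n - 1
--     for j in range(k - 2, -1, -1):
--         c = cut[e - 1][j]
--         parts.append(src[c + 1:e + 1])
--         e = c
--     parts.append(src[:e + 1])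
--     return parts if do_rotate else parts[::-1]
-- ===== Notes on version B (the rewrite author's own statement) =====
-- stated objective: alternative
-- what changed: B abandons A's bottom-up 2-D DP tables (table/solution matrices filled by three staged loops and read back by two duplicated while-loop backtracks): it computes the minimax cost by a top-down memoized recursion on the number of blocks with a running tail sum, derives the cut matrix on demand from that recursion, and rebuilds the partition in one loop of list slices.
import Mathlib
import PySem

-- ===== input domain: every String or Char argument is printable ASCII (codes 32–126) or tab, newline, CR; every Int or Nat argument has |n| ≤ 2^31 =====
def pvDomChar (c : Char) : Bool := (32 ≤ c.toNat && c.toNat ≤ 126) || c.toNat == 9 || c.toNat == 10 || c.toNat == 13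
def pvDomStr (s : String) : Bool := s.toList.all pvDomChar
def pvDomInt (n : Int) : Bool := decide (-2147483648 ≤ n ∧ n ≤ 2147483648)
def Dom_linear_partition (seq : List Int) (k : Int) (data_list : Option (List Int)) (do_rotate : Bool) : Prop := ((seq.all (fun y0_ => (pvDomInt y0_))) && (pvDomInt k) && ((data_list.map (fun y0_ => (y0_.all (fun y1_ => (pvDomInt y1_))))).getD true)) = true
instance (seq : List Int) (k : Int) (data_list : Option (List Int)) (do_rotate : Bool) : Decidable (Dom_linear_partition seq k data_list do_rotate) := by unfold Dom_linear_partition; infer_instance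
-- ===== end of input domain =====

-- B replaces A's bottom-up 2-D DP tables and duplicated backtrack while-loops by a top-down
-- recursion on the number of blocks (cost values computed on demand with a running tail sum;
-- memo cache in Source B is pure memoization and is ported as the recursion it caches) plus one
-- reconstruction loop over slices; objective: alternative decomposition, not speed.  On
-- k > len(seq)-1 Python A returns a lazy `map` object of the singleton rows; both ports
-- produce that list of rows.

-- ===== PORT A =====
-- m[i][j] read/write with Python index semantics (negative indices wrap)
def pvGet2 (m : List (List Int)) (i j : Int) : Int :=
  PySem.List.pyGetD (PySem.List.pyGetD m i []) j 0
def pvSet2 (m : List (List Int)) (i j : Int) (v : Int) : List (List Int) :=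
  PySem.List.pySetD m i (PySem.List.pySetD (PySem.List.pyGetD m i []) j v)

def linear_partition_table (seq : List Int) (k : Int) : List (List Int) × List (List Int) :=
  let n : Int := PySem.List.len seq
  let table : List (List Int) := (PySem.List.pyRange 0 n 1).map (fun _ => List.replicate k.toNat 0)
  let solution : List (List Int) := (PySem.List.pyRange 0 (n-1) 1).map (fun _ => List.replicate (k-1).toNat 0)
  let table := (PySem.List.pyRange 0 n 1).foldl (fun t i =>
      pvSet2 t i 0 (PySem.List.pyGetD seq i 0 + (if i ≠ 0 then pvGet2 t (i-1) 0 else 0))) table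
  let table := (PySem.List.pyRange 0 k 1).foldl (fun t j =>
      pvSet2 t 0 j (PySem.List.pyGetD seq 0 0)) table
  -- min((…, x) for x in range(i), key=itemgetter(0)): first minimal pair; range(i) with i ≥ 1 is
  -- nonempty so Python's min never raises here; .getD (0,0) is never taken
  (PySem.List.pyRange 1 n 1).foldl (fun ts i =>
      (PySem.List.pyRange 1 k 1).foldl (fun ts j =>
        let cands := (PySem.List.pyRange 0 i 1).map (fun x =>
          (max (pvGet2 ts.1 x (j-1)) (pvGet2 ts.1 i 0 - pvGet2 ts.1 x 0), x))
        let p := (PySem.List.min? cands (fun q => q.1)).getD (0, 0)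
        (pvSet2 ts.1 i j p.1, pvSet2 ts.2 (i-1) (j-1) p.2)) ts) (table, solution)

-- A's 'while k >= 0: … n, k = solution[n-1][k], k-1' = 'for kk in range(k-2, -1, -1)' over state (n, ans)
def pvBuildA (sol : List (List Int)) (src : List Int) (k n : Int) (do_rotate : Bool) : List (List Int) :=
  let st := (PySem.List.pyRange (k-2) (-1) (-1)).foldl (fun (st : Int × List (List Int)) kk =>
      let c := pvGet2 sol (st.1 - 1) kk
      let row := [(PySem.List.pyRange (c + 1) (st.1 + 1) 1).map (fun i => PySem.List.pyGetD src i 0)]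
      (c, if do_rotate then st.2 ++ row else row ++ st.2)) (n, [])
  let row := [(PySem.List.pyRange 0 (st.1 + 1) 1).map (fun i => PySem.List.pyGetD src i 0)]
  if do_rotate then st.2 ++ row else row ++ st.2

def linear_partition (seq : List Int) (k : Int) (data_list : Option (List Int)) (do_rotate : Bool) : List (List Int) :=
  if k ≤ 0 then []
  else
    let n : Int := PySem.List.len seq - 1
    if k > n then seq.map (fun x => [x])  -- Python returns a lazy map object of these rows here
    else
      let sol := (linear_partition_table seq k).2
      -- 'if data_list == None or len(data_list) != len(seq)': the seq branch, else the data_list branch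
      match data_list with
      | none => pvBuildA sol seq k n do_rotate
      | some dl =>
        if PySem.List.len dl ≠ PySem.List.len seq then pvBuildA sol seq k n do_rotate
        else pvBuildA sol dl k n do_rotate

-- ===== PORT B =====
-- Source B's cost(i, j): recursion on j (the memo dict only caches these values); the inner loop
-- keeps the running tail sum sum(seq[x+1:i+1]) in the fold state exactly as Source B does
def bCost (seq : List Int) : Nat → Int → Int
  | 0, i => (PySem.List.slice seq none (some (i+1))).sum
  | j+1, i =>
    if i = 0 then PySem.List.pyGetD seq 0 0
    else
      ((PySem.List.pyRange 1 i 1).foldl (fun (st : Int × Int) x =>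
          let tail := st.1 - PySem.List.pyGetD seq x 0
          let v := max (bCost seq j x) tail
          (tail, if v < st.2 then v else st.2))
        ((PySem.List.slice seq (some 1) (some (i+1))).sum,
         max (bCost seq j 0) (PySem.List.slice seq (some 1) (some (i+1))).sum)).2

-- Source B's best_cut(i, j): first x minimizing max(cost(x, j), tail); state (tail, best, cut)
def bCut (seq : List Int) (i : Int) (j : Nat) : Int :=
  ((PySem.List.pyRange 1 i 1).foldl (fun (st : Int × Int × Int) x =>
      let tail := st.1 - PySem.List.pyGetD seq x 0
      let v := max (bCost seq j x) tail
      if v < st.2.1 then (tail, v, x) else (tail, st.2.1, st.2.2))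
    ((PySem.List.slice seq (some 1) (some (i+1))).sum,
     max (bCost seq j 0) (PySem.List.slice seq (some 1) (some (i+1))).sum, 0)).2.2

def linear_partition_alt (seq : List Int) (k : Int) (data_list : Option (List Int)) (do_rotate : Bool) : List (List Int) :=
  if k ≤ 0 then []
  else
    let n : Int := PySem.List.len seq
    if k ≥ n then seq.map (fun x => [x])
    else
      let cut : List (List Int) := (PySem.List.pyRange 1 n 1).map (fun i =>
          (PySem.List.pyRange 0 (k-1) 1).map (fun j => bCut seq i j.toNat))
      let src := match data_list with
        | none => seq
        | some dl => if PySem.List.len dl ≠ n then seq else dl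
      -- parts appended top block first (cut[e-1][j] wraps for e = 0 exactly as Python's cut[-1])
      let st := (PySem.List.pyRange (k-2) (-1) (-1)).foldl
          (fun (st : Int × List (List Int)) j =>
            let c := pvGet2 cut (st.1 - 1) j
            (c, st.2 ++ [PySem.List.slice src (some (c+1)) (some (st.1+1))])) (n - 1, [])
      let parts := st.2 ++ [PySem.List.slice src none (some (st.1+1))]
      if do_rotate then parts else parts.reverse

-- ===== PRECONDITION & SPEC =====
def Spec_linear_partition (seq : List Int) (k : Int) (data_list : Option (List Int)) (do_rotate : Bool) (out : List (List Int)) : Prop := out = linear_partition_alt seq k data_list do_rotate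
instance (seq : List Int) (k : Int) (data_list : Option (List Int)) (do_rotate : Bool) (out : List (List Int)) : Decidable (Spec_linear_partition seq k data_list do_rotate out) := by unfold Spec_linear_partition; infer_instance

-- ===== CLAIM (what is proved, stated in full; the proofs are below) =====
def Claim_equal_linear_partition : Prop := ∀ (seq : List Int) (k : Int) (data_list : Option (List Int)) (do_rotate : Bool), Dom_linear_partition seq k data_list do_rotate → Spec_linear_partition seq k data_list do_rotate (linear_partition seq k data_list do_rotate)

-- ===== LEMMAS AND PROOFS =====

-- ---- generic helpers ----
-- fold over pyRange a (a+m) 1 with an invariant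
theorem pvFoldInv {σ : Type} (f : σ → Int → σ) (a : Int) (P : Int → σ → Prop)
    (m : Nat) (s0 : σ) (h0 : P a s0)
    (hstep : ∀ (t : Nat) s, t < m → P (a + t) s → P (a + t + 1) (f s (a + t))) :
    P (a + m) ((PySem.List.pyRange a (a + m) 1).foldl f s0) := by
  induction m generalizing s0 with
  | zero => simpa [PySem.List.pyRange_one_eq_nil (le_refl a)] using h0
  | succ m ih =>
    have hsplit : PySem.List.pyRange a (a + (m+1 : Nat)) 1
        = PySem.List.pyRange a (a + m) 1 ++ [a + m] := by
      have := PySem.List.pyRange_one_succ_right (a := a) (b := a + m) (by omega)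
      simpa [add_assoc] using this
    rw [hsplit, List.foldl_append]
    have hm : P (a + m) ((PySem.List.pyRange a (a + m) 1).foldl f s0) :=
      ih s0 h0 (fun t s ht hP => hstep t s (by omega) hP)
    have := hstep m _ (by omega) hm
    simpa [add_assoc] using this

theorem pvGet1_vec {α : Type} (N : Nat) (g : Nat → α) (i : Int) (d : α)
    (h1 : 0 ≤ i) (h2 : i < (N : Int)) :
    PySem.List.pyGetD ((List.range N).map g) i d = g i.toNat := by
  rw [PySem.List.pyGetD_eq_getElem _ d h1 (by simpa using h2)]
  simp

theorem pvGet2_mat (N kN : Nat) (g : Nat → Nat → Int) (i j : Int)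
    (hi1 : 0 ≤ i) (hi2 : i < (N : Int)) (hj1 : 0 ≤ j) (hj2 : j < (kN : Int)) :
    pvGet2 ((List.range N).map (fun r => (List.range kN).map (fun c => g r c))) i j
      = g i.toNat j.toNat := by
  unfold pvGet2
  rw [pvGet1_vec N _ i _ hi1 hi2, pvGet1_vec kN _ j _ hj1 hj2]

theorem pvSet1_vec {α : Type} (N : Nat) (g : Nat → α) (i : Int) (v : α)
    (h1 : 0 ≤ i) :
    PySem.List.pySetD ((List.range N).map g) i v
      = (List.range N).map (fun t => if t = i.toNat then v else g t) := by
  rw [PySem.List.pySetD_of_nonneg _ _ h1]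
  apply List.ext_getElem (by simp)
  intro t ht1 ht2
  simp only [List.getElem_set, List.getElem_map, List.getElem_range]
  split_ifs with hA hB hB <;> first | rfl | omega

theorem pvSet2_mat (N kN : Nat) (g : Nat → Nat → Int) (i j : Int) (v : Int)
    (hi1 : 0 ≤ i) (hi2 : i < (N : Int)) (hj1 : 0 ≤ j) :
    pvSet2 ((List.range N).map (fun r => (List.range kN).map (fun c => g r c))) i j v
      = (List.range N).map (fun r => (List.range kN).map (fun c =>
          if r = i.toNat ∧ c = j.toNat then v else g r c)) := by
  unfold pvSet2
  rw [pvGet1_vec N _ i _ hi1 hi2, pvSet1_vec kN _ j _ hj1, pvSet1_vec N _ i _ hi1]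
  refine List.map_congr_left (fun r hr => ?_)
  by_cases hri : r = i.toNat
  · subst hri
    simp only []
    refine List.map_congr_left (fun c hc => ?_)
    by_cases hcj : c = j.toNat <;> simp [hcj]
  · simp only [if_neg hri]
    refine List.map_congr_left (fun c hc => ?_)
    simp [hri]

theorem pvMat_congr (N kN : Nat) (g h : Nat → Nat → Int)
    (he : ∀ r < N, ∀ c < kN, g r c = h r c) :
    (List.range N).map (fun r => (List.range kN).map (fun c => g r c))
      = (List.range N).map (fun r => (List.range kN).map (fun c => h r c)) := by
  refine List.map_congr_left (fun r hr => ?_)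
  refine List.map_congr_left (fun c hc => ?_)
  exact he r (List.mem_range.mp hr) c (List.mem_range.mp hc)

-- ---- spec values ----
def preI (seq : List Int) (i : Int) : Int := (seq.take i.toNat).sum

def bestS (prev s : Int → Int) (i : Int) : Int × Int :=
  (PySem.List.pyRange 1 i 1).foldl
    (fun b x => let v := max (prev x) (s (i+1) - s (x+1)); if v < b.1 then (v, x) else b)
    (max (prev 0) (s (i+1) - s 1), 0)

def Tc (seq : List Int) : Nat → Int → Int
  | 0 => fun i => preI seq (i+1)
  | c+1 => fun i => if i = 0 then preI seq 1 else (bestS (Tc seq c) (preI seq) i).1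

def ES (seq : List Int) (c : Nat) (r : Int) : Int := (bestS (Tc seq c) (preI seq) r).2

def solF (seq : List Int) (N kN : Nat) : List (List Int) :=
  (List.range (N-1)).map (fun (r : Nat) => (List.range (kN-1)).map (fun (c : Nat) => ES seq c ((r:Int)+1)))

-- first-minimal min? over pairs = strict-improvement fold
theorem pvMin2 {α : Type} (key : α → Int) (b c : α) (rest : List α) :
    PySem.List.min? (b :: c :: rest) key
      = PySem.List.min? ((if key c < key b then c else b) :: rest) key := by
  simp only [PySem.List.min?, List.foldl_cons]
  split_ifs <;> rfl

theorem pvMinFold (g : Int → Int) (l : List Int) (b : Int × Int) :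
    PySem.List.min? (b :: l.map (fun x => (g x, x))) (fun q => q.1)
      = some (l.foldl (fun b x => if g x < b.1 then (g x, x) else b) b) := by
  induction l generalizing b with
  | nil => simp [PySem.List.min?]
  | cons x xs ih =>
    simp only [List.map_cons, List.foldl_cons]
    rw [pvMin2]
    split_ifs with h
    · exact ih _
    · exact ih _

theorem pvMinChar (g : Int → Int) (i : Int) (hi : 1 ≤ i) :
    PySem.List.min? ((PySem.List.pyRange 0 i 1).map (fun x => (g x, x))) (fun q => q.1)
      = some ((PySem.List.pyRange 1 i 1).foldl
          (fun b x => if g x < b.1 then (g x, x) else b) (g 0, 0)) := by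
  rw [PySem.List.pyRange_one_cons (by omega)]
  have h01 : (0:Int) + 1 = 1 := by norm_num
  rw [List.map_cons, h01]
  exact pvMinFold g (PySem.List.pyRange 1 i 1) (g 0, 0)

-- entries of solF are cut indices in [0, N-2]
theorem pvBestS_snd_bounds (prev s : Int → Int) (i : Int) (hi : 1 ≤ i) :
    0 ≤ (bestS prev s i).2 ∧ (bestS prev s i).2 ≤ i - 1 := by
  unfold bestS
  refine List.foldlRecOn (motive := fun (b : Int × Int) => 0 ≤ b.2 ∧ b.2 ≤ i - 1) _ _ ⟨le_refl 0, by omega⟩ ?_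
  intro b hb x hx
  have hx' := (PySem.List.mem_pyRange_one).mp hx
  dsimp only
  split_ifs <;> simp <;> omega

theorem pvSolF_bounds (seq : List Int) (N kN : Nat) (hN : 2 ≤ N) :
    ∀ row ∈ solF seq N kN, ∀ v ∈ row, 0 ≤ v ∧ v ≤ (N : Int) - 2 := by
  intro row hrow v hv
  unfold solF at hrow
  rcases List.mem_map.mp hrow with ⟨r, hr, hrow'⟩
  subst hrow'
  rcases List.mem_map.mp hv with ⟨c, hc, hv'⟩
  subst hv'
  have hr' := List.mem_range.mp hr
  have := pvBestS_snd_bounds (Tc seq c) (preI seq) ((r:Int)+1) (by omega)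
  unfold ES
  omega

-- basic spec facts
theorem pvRepl {α : Type} (n : Nat) (v : α) :
    List.replicate n v = (List.range n).map (fun _ => v) := by
  simp [List.map_const']

theorem pvConstMap {α : Type} (n : Nat) (w : α) :
    (PySem.List.pyRange 0 (n:Int) 1).map (fun _ => w) = (List.range n).map (fun _ => w) := by
  have h1 : ((PySem.List.pyRange 0 (n:Int) 1).map (fun _ => w)).length = n := by
    simp [PySem.List.length_pyRange_one]
  have h2 : ((List.range n).map (fun _ => w)).length = n := by simp
  rw [List.map_const', List.map_const']
  simp [PySem.List.length_pyRange_one]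

theorem pvPreI_succ (seq : List Int) (t : Nat) (ht : t < seq.length) :
    preI seq ((t:Int)+1) = preI seq (t:Int) + seq[t] := by
  unfold preI
  have h1 : ((t:Int)+1).toNat = t + 1 := by omega
  have h2 : ((t:Int)).toNat = t := by omega
  rw [h1, h2]
  exact List.sum_take_succ seq t ht

theorem pvPreI_one (seq : List Int) (h : 1 ≤ seq.length) :
    preI seq 1 = seq[0] := by
  have := pvPreI_succ seq 0 h
  simpa [preI] using this

theorem pvTc_zero_col (seq : List Int) (c : Nat) : Tc seq c 0 = preI seq 1 := by
  cases c <;> simp [Tc]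

-- matrix entry functions for A's loop-3 invariant
def tblG (seq : List Int) (i j : Nat) (r c : Nat) : Int :=
  if r < i ∨ c = 0 ∨ (r = i ∧ c < j) then Tc seq c (r:Int) else 0
def solG (seq : List Int) (i j : Nat) (r c : Nat) : Int :=
  if r + 1 < i ∨ (r + 1 = i ∧ c + 1 < j) then ES seq c ((r:Int)+1) else 0

-- A's first loop fills column 0 with prefix sums
theorem pvLoop1 (seq : List Int) (kN : Nat) (hkN : 1 ≤ kN) :
    (PySem.List.pyRange 0 (seq.length:Int) 1).foldl
      (fun t i => pvSet2 t i 0 (PySem.List.pyGetD seq i 0 + (if i ≠ 0 then pvGet2 t (i-1) 0 else 0)))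
      ((List.range seq.length).map (fun (_ : Nat) => (List.range kN).map (fun (_ : Nat) => (0:Int))))
    = (List.range seq.length).map (fun (r : Nat) => (List.range kN).map (fun (c : Nat) =>
        if c = 0 then preI seq ((r:Int)+1) else 0)) := by
  set N := seq.length with hN
  have h0 : (0:Int) + (N:Int) = (N:Int) := by omega
  have key := pvFoldInv
    (f := fun t i => pvSet2 t i 0 (PySem.List.pyGetD seq i 0 + (if i ≠ 0 then pvGet2 t (i-1) 0 else 0)))
    (a := 0)
    (P := fun b s => s = (List.range N).map (fun (r : Nat) => (List.range kN).map (fun (c : Nat) =>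
        if c = 0 ∧ (r:Int) < b then preI seq ((r:Int)+1) else 0)))
    (m := N)
    (s0 := (List.range N).map (fun (_ : Nat) => (List.range kN).map (fun (_ : Nat) => (0:Int))))
    (h0 := by
      apply pvMat_congr
      intro r hr c hc
      rw [if_neg (by omega)])
    (hstep := ?_)
  · rw [h0] at key
    rw [key]
    apply pvMat_congr
    intro r hr c hc
    by_cases hc0 : c = 0
    · rw [if_pos ⟨hc0, by omega⟩, if_pos hc0]
    · rw [if_neg (by omega), if_neg hc0]
  · intro t s ht hP
    subst hP
    simp only [zero_add]
    have hval : (PySem.List.pyGetD seq (t:Int) 0 +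
        (if (t:Int) ≠ 0 then pvGet2 ((List.range N).map (fun (r : Nat) => (List.range kN).map (fun (c : Nat) =>
          if c = 0 ∧ (r:Int) < (t:Int) then preI seq ((r:Int)+1) else 0))) ((t:Int)-1) 0 else 0))
        = preI seq ((t:Int)+1) := by
      rw [PySem.List.pyGetD_eq_getElem seq 0 (by omega) (by exact_mod_cast ht)]
      by_cases ht0 : t = 0
      · subst ht0
        rw [if_neg (by omega)]
        have h := pvPreI_succ seq 0 ht
        simp only [Nat.cast_zero] at h ⊢
        rw [h]
        simp [preI]
      · rw [if_pos (by exact_mod_cast ht0)]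
        have hm1 : ((t:Int) - 1) = ((t-1 : Nat) : Int) := by omega
        rw [hm1, pvGet2_mat N kN _ _ _ (by omega) (by omega) (by omega) (by exact_mod_cast hkN)]
        rw [if_pos ⟨rfl, by omega⟩]
        have hTT : ((((t-1:Nat):Int)).toNat) = t - 1 := by omega
        rw [hTT]
        have h1 : (((t-1:Nat):Int)+1) = (t:Int) := by omega
        have hT : ((t:Int)).toNat = t := by omega
        rw [h1, pvPreI_succ seq t ht]
        simp only [hT]
        ring
    rw [hval]
    rw [pvSet2_mat N kN _ _ _ _ (by omega) (by exact_mod_cast ht) (by omega)]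
    apply pvMat_congr
    intro r hr c hc
    have hT : ((t:Int)).toNat = t := by omega
    have hZ : ((0:Int)).toNat = 0 := rfl
    rw [hT, hZ]
    by_cases h1 : r = t ∧ c = 0
    · rw [if_pos h1, if_pos ⟨h1.2, by omega⟩, h1.1]
    · rw [if_neg h1]
      by_cases h2 : c = 0 ∧ (r:Int) < (t:Int)
      · rw [if_pos h2, if_pos ⟨h2.1, by omega⟩]
      · rw [if_neg h2, if_neg (fun hcon => (by
          rcases hcon with ⟨hc0, hlt⟩
          exact h2 ⟨hc0, by omega⟩ : False))]

def pvMat (N kN : Nat) (g : Nat → Nat → Int) : List (List Int) :=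
  (List.range N).map (fun (r : Nat) => (List.range kN).map (fun (c : Nat) => g r c))

theorem pvGet2M (N kN : Nat) (g : Nat → Nat → Int) (i j : Int)
    (hi1 : 0 ≤ i) (hi2 : i < (N : Int)) (hj1 : 0 ≤ j) (hj2 : j < (kN : Int)) :
    pvGet2 (pvMat N kN g) i j = g i.toNat j.toNat := by
  unfold pvMat; exact pvGet2_mat N kN g i j hi1 hi2 hj1 hj2

theorem pvSet2M (N kN : Nat) (g : Nat → Nat → Int) (i j : Int) (v : Int)
    (hi1 : 0 ≤ i) (hi2 : i < (N : Int)) (hj1 : 0 ≤ j) :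
    pvSet2 (pvMat N kN g) i j v
      = pvMat N kN (fun r c => if r = i.toNat ∧ c = j.toNat then v else g r c) := by
  unfold pvMat; exact pvSet2_mat N kN g i j v hi1 hi2 hj1

theorem pvMatCongr (N kN : Nat) (g h : Nat → Nat → Int)
    (he : ∀ r < N, ∀ c < kN, g r c = h r c) : pvMat N kN g = pvMat N kN h := by
  unfold pvMat; exact pvMat_congr N kN g h he

theorem pvTc_succ (seq : List Int) (c : Nat) (i : Int) (hi : i ≠ 0) :
    Tc seq (c+1) i = (bestS (Tc seq c) (preI seq) i).1 := by
  simp [Tc, hi]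

-- A's second loop writes seq[0] across row 0
theorem pvLoop2 (seq : List Int) (k : Int) (hk1 : 1 ≤ k) (hlen : 1 ≤ seq.length) :
    (PySem.List.pyRange 0 k 1).foldl (fun t j => pvSet2 t 0 j (PySem.List.pyGetD seq 0 0))
      ((List.range seq.length).map (fun (r : Nat) => (List.range k.toNat).map (fun (c : Nat) =>
        if c = 0 then preI seq ((r:Int)+1) else 0)))
    = pvMat seq.length k.toNat (tblG seq 1 1) := by
  set N := seq.length with hN
  set kN := k.toNat with hkN
  have hco : (PySem.List.pyGetD seq 0 0) = preI seq 1 := by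
    rw [PySem.List.pyGetD_eq_getElem seq 0 (by omega) (by exact_mod_cast hlen)]
    rw [pvPreI_one seq hlen]; rfl
  have hkk : (0:Int) + (kN:Int) = k := by omega
  have key := pvFoldInv
    (f := fun t j => pvSet2 t 0 j (PySem.List.pyGetD seq 0 0))
    (a := 0)
    (P := fun b s => s = pvMat N kN (fun r c =>
        if c = 0 then preI seq ((r:Int)+1)
        else if r = 0 ∧ (c:Int) < b then preI seq 1 else 0))
    (m := kN)
    (s0 := (List.range N).map (fun (r : Nat) => (List.range kN).map (fun (c : Nat) =>
        if c = 0 then preI seq ((r:Int)+1) else 0)))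
    (h0 := by
      apply pvMat_congr
      intro r hr c hc
      by_cases hc0 : c = 0
      · rw [if_pos hc0, if_pos hc0]
      · rw [if_neg hc0, if_neg hc0, if_neg (by omega)])
    (hstep := ?_)
  · rw [hkk] at key
    rw [key]
    apply pvMatCongr
    intro r hr c hc
    unfold tblG
    by_cases hc0 : c = 0
    · rw [if_pos hc0, if_pos (by omega), hc0]
      have : Tc seq 0 (r:Int) = preI seq ((r:Int)+1) := rfl
      rw [this]
    · rw [if_neg hc0]
      by_cases hr0 : r = 0
      · rw [if_pos ⟨hr0, by omega⟩, if_pos (by omega), hr0]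
        simp [pvTc_zero_col]
      · rw [if_neg (by omega), if_neg (by omega)]
  · intro t s ht hP
    subst hP
    simp only [zero_add]
    rw [hco, pvSet2M N kN _ 0 (t:Int) _ (by omega) (by omega) (by omega)]
    apply pvMatCongr
    intro r hr c hc
    have hZ : ((0:Int)).toNat = 0 := rfl
    have hT : ((t:Int)).toNat = t := by omega
    rw [hZ, hT]
    by_cases h1 : r = 0 ∧ c = t
    · rw [if_pos h1]
      by_cases hc0 : c = 0
      · rw [if_pos hc0, h1.1]
        norm_num
      · rw [if_neg hc0, if_pos ⟨h1.1, by omega⟩]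
    · rw [if_neg h1]
      by_cases hc0 : c = 0
      · rw [if_pos hc0, if_pos hc0]
      · rw [if_neg hc0, if_neg hc0]
        by_cases h2 : r = 0 ∧ (c:Int) < (t:Int)
        · rw [if_pos h2, if_pos ⟨h2.1, by omega⟩]
        · rw [if_neg h2, if_neg (by
            intro hcon
            exact h2 ⟨hcon.1, by
              rcases hcon with ⟨hr0, hlt⟩
              have hct : c ≠ t := fun hh => h1 ⟨hr0, hh⟩
              omega⟩)]

theorem pvBestS_eq (prev s : Int → Int) (i : Int) :
    (PySem.List.pyRange 1 i 1).foldl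
      (fun (b : Int × Int) x => if max (prev x) (s (i+1) - s (x+1)) < b.1
          then (max (prev x) (s (i+1) - s (x+1)), x) else b)
      (max (prev 0) (s (i+1) - s (0+1)), 0)
    = bestS prev s i := by
  unfold bestS
  norm_num

theorem pvLoop3Step (seq : List Int) (k i j : Int)
    (hk1 : 1 ≤ k) (hk2 : k < (seq.length:Int)) (hi1 : 1 ≤ i) (hi2 : i < (seq.length:Int))
    (hj1 : 1 ≤ j) (hj2 : j ≤ k - 1) :
    ((fun (ts : List (List Int) × List (List Int)) (j : Int) =>
        (pvSet2 ts.1 i j ((PySem.List.min? ((PySem.List.pyRange 0 i 1).map (fun x =>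
            (max (pvGet2 ts.1 x (j-1)) (pvGet2 ts.1 i 0 - pvGet2 ts.1 x 0), x))) (fun q => q.1)).getD (0,0)).1,
         pvSet2 ts.2 (i-1) (j-1) ((PySem.List.min? ((PySem.List.pyRange 0 i 1).map (fun x =>
            (max (pvGet2 ts.1 x (j-1)) (pvGet2 ts.1 i 0 - pvGet2 ts.1 x 0), x))) (fun q => q.1)).getD (0,0)).2))
      (pvMat seq.length k.toNat (tblG seq i.toNat j.toNat),
       pvMat (seq.length-1) (k.toNat-1) (solG seq i.toNat j.toNat)) j)
    = (pvMat seq.length k.toNat (tblG seq i.toNat (j.toNat+1)),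
       pvMat (seq.length-1) (k.toNat-1) (solG seq i.toNat (j.toNat+1))) := by
  set N := seq.length with hN
  set kt := k.toNat with hkt
  set it := i.toNat with hit
  set jt := j.toNat with hjt
  have hNk : (2:Int) ≤ (N:Int) := by omega
  have hcands : ((PySem.List.pyRange 0 i 1).map (fun x =>
      (max (pvGet2 (pvMat N kt (tblG seq it jt)) x (j-1))
           (pvGet2 (pvMat N kt (tblG seq it jt)) i 0 - pvGet2 (pvMat N kt (tblG seq it jt)) x 0), x)))
      = (PySem.List.pyRange 0 i 1).map (fun x =>
      (max (Tc seq (jt-1) x) (preI seq (i+1) - preI seq (x+1)), x)) := by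
    apply List.map_congr_left
    intro x hx
    have hx' := (PySem.List.mem_pyRange_one).mp hx
    have e1 : pvGet2 (pvMat N kt (tblG seq it jt)) x (j-1) = Tc seq (jt-1) x := by
      rw [pvGet2M N kt _ x (j-1) (by omega) (by omega) (by omega) (by omega)]
      unfold tblG
      rw [if_pos (Or.inl (by omega))]
      have h1 : (j-1).toNat = jt - 1 := by omega
      have h2 : ((x.toNat:Int)) = x := by omega
      rw [h1, h2]
    have e2 : pvGet2 (pvMat N kt (tblG seq it jt)) i 0 = preI seq (i+1) := by
      rw [pvGet2M N kt _ i 0 (by omega) (by omega) (by omega) (by omega)]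
      unfold tblG
      simp only [Int.toNat_zero]
      rw [if_pos (Or.inr (Or.inl trivial))]
      show Tc seq 0 ((it:Int)) = _
      unfold Tc
      have h2 : ((it:Int)) = i := by omega
      rw [h2]
    have e3 : pvGet2 (pvMat N kt (tblG seq it jt)) x 0 = preI seq (x+1) := by
      rw [pvGet2M N kt _ x 0 (by omega) (by omega) (by omega) (by omega)]
      unfold tblG
      simp only [Int.toNat_zero]
      rw [if_pos (Or.inr (Or.inl trivial))]
      show Tc seq 0 ((x.toNat:Int)) = _
      unfold Tc
      have h2 : ((x.toNat:Int)) = x := by omega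
      rw [h2]
    rw [e1, e2, e3]
  dsimp only
  rw [hcands]
  rw [pvMinChar (fun x => max (Tc seq (jt-1) x) (preI seq (i+1) - preI seq (x+1))) i hi1]
  rw [Option.getD_some]
  rw [pvBestS_eq (Tc seq (jt-1)) (preI seq) i]
  have hp1 : (bestS (Tc seq (jt-1)) (preI seq) i).1 = Tc seq jt i := by
    rw [← pvTc_succ seq (jt-1) i (by omega)]
    congr 1
    omega
  have hp2 : (bestS (Tc seq (jt-1)) (preI seq) i).2 = ES seq (jt-1) i := rfl
  rw [hp1, hp2]
  rw [Prod.mk.injEq]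
  constructor
  case _ =>
    rw [pvSet2M N kt _ i j _ (by omega) (by omega) (by omega)]
    apply pvMatCongr
    intro r hr c hc
    unfold tblG
    by_cases h1 : r = it ∧ c = jt
    · rw [if_pos (by exact ⟨by omega, by omega⟩), if_pos (Or.inr (Or.inr ⟨h1.1, by omega⟩))]
      rw [h1.1, h1.2]
      have : ((it:Int)) = i := by omega
      rw [this]
    · rw [if_neg (by
        intro hcon
        exact h1 ⟨by omega, by omega⟩)]
      by_cases h2 : r < it ∨ c = 0 ∨ (r = it ∧ c < jt)
      · rw [if_pos h2, if_pos (by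
          rcases h2 with h | h | ⟨ha, hb⟩
          · exact Or.inl h
          · exact Or.inr (Or.inl h)
          · exact Or.inr (Or.inr ⟨ha, by omega⟩))]
      · rw [if_neg h2, if_neg (by
          intro hcon
          rcases hcon with h | h | ⟨ha, hb⟩
          · exact h2 (Or.inl h)
          · exact h2 (Or.inr (Or.inl h))
          · have hcj : c ≠ jt := fun hh => h1 ⟨ha, hh⟩
            exact h2 (Or.inr (Or.inr ⟨ha, by omega⟩)))]
  case _ =>
    rw [pvSet2M (N-1) (kt-1) _ (i-1) (j-1) _ (by omega) (by omega) (by omega)]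
    apply pvMatCongr
    intro r hr c hc
    unfold solG
    by_cases h1 : r = it - 1 ∧ c = jt - 1
    · rw [if_pos (by exact ⟨by omega, by omega⟩), if_pos (Or.inr ⟨by omega, by omega⟩)]
      rw [h1.2]
      have : (((r:Int))+1) = i := by omega
      rw [this]
    · rw [if_neg (by
        intro hcon
        exact h1 ⟨by omega, by omega⟩)]
      by_cases h2 : r + 1 < it ∨ (r + 1 = it ∧ c + 1 < jt)
      · rw [if_pos h2, if_pos (by
          rcases h2 with h | ⟨ha, hb⟩
          · exact Or.inl h
          · exact Or.inr ⟨ha, by omega⟩)]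
      · rw [if_neg h2, if_neg (by
          intro hcon
          rcases hcon with h | ⟨ha, hb⟩
          · exact h2 (Or.inl h)
          · have : c ≠ jt - 1 := fun hh => h1 ⟨by omega, hh⟩
            exact h2 (Or.inr ⟨ha, by omega⟩))]

theorem pvLoop3Inner (seq : List Int) (k i : Int)
    (hk1 : 1 ≤ k) (hk2 : k < (seq.length:Int)) (hi1 : 1 ≤ i) (hi2 : i < (seq.length:Int)) :
    (PySem.List.pyRange 1 k 1).foldl
      (fun (ts : List (List Int) × List (List Int)) (j : Int) =>
        (pvSet2 ts.1 i j ((PySem.List.min? ((PySem.List.pyRange 0 i 1).map (fun x =>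
            (max (pvGet2 ts.1 x (j-1)) (pvGet2 ts.1 i 0 - pvGet2 ts.1 x 0), x))) (fun q => q.1)).getD (0,0)).1,
         pvSet2 ts.2 (i-1) (j-1) ((PySem.List.min? ((PySem.List.pyRange 0 i 1).map (fun x =>
            (max (pvGet2 ts.1 x (j-1)) (pvGet2 ts.1 i 0 - pvGet2 ts.1 x 0), x))) (fun q => q.1)).getD (0,0)).2))
      (pvMat seq.length k.toNat (tblG seq i.toNat 1),
       pvMat (seq.length-1) (k.toNat-1) (solG seq i.toNat 1))
    = (pvMat seq.length k.toNat (tblG seq (i.toNat+1) 1),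
       pvMat (seq.length-1) (k.toNat-1) (solG seq (i.toNat+1) 1)) := by
  set N := seq.length with hN
  set kt := k.toNat with hkt
  have hkk : (1:Int) + ((kt-1 : Nat):Int) = k := by omega
  have key := pvFoldInv
    (f := (fun (ts : List (List Int) × List (List Int)) (j : Int) =>
        (pvSet2 ts.1 i j ((PySem.List.min? ((PySem.List.pyRange 0 i 1).map (fun x =>
            (max (pvGet2 ts.1 x (j-1)) (pvGet2 ts.1 i 0 - pvGet2 ts.1 x 0), x))) (fun q => q.1)).getD (0,0)).1,
         pvSet2 ts.2 (i-1) (j-1) ((PySem.List.min? ((PySem.List.pyRange 0 i 1).map (fun x =>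
            (max (pvGet2 ts.1 x (j-1)) (pvGet2 ts.1 i 0 - pvGet2 ts.1 x 0), x))) (fun q => q.1)).getD (0,0)).2)))
    (a := 1)
    (P := fun b ts => ts = (pvMat N kt (tblG seq i.toNat b.toNat),
        pvMat (N-1) (kt-1) (solG seq i.toNat b.toNat)))
    (m := kt - 1)
    (s0 := (pvMat N kt (tblG seq i.toNat 1), pvMat (N-1) (kt-1) (solG seq i.toNat 1)))
    (h0 := by norm_num)
    (hstep := ?_)
  · rw [hkk] at key
    rw [key]
    have hktt : k.toNat = kt := rfl
    rw [Prod.mk.injEq]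
    constructor
    · apply pvMatCongr
      intro r hr c hc
      unfold tblG
      by_cases h2 : r < i.toNat ∨ c = 0 ∨ (r = i.toNat ∧ c < k.toNat)
      · rw [if_pos h2, if_pos (by
          rcases h2 with h | h | ⟨ha, hb⟩
          · exact Or.inl (by omega)
          · exact Or.inr (Or.inl h)
          · exact Or.inl (by omega))]
      · rw [if_neg h2, if_neg (by
          intro hcon
          rcases hcon with h | h | ⟨ha, hb⟩
          · rcases Nat.lt_succ_iff_lt_or_eq.mp h with h' | h'
            · exact h2 (Or.inl h')
            · exact h2 (Or.inr (Or.inr ⟨h', by omega⟩))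
          · exact h2 (Or.inr (Or.inl h))
          · omega)]
    · apply pvMatCongr
      intro r hr c hc
      unfold solG
      by_cases h2 : r + 1 < i.toNat ∨ (r + 1 = i.toNat ∧ c + 1 < k.toNat)
      · rw [if_pos h2, if_pos (by
          rcases h2 with h | ⟨ha, hb⟩
          · exact Or.inl (by omega)
          · exact Or.inl (by omega))]
      · rw [if_neg h2, if_neg (by
          intro hcon
          rcases hcon with h | ⟨ha, hb⟩
          · by_cases hcase : r + 1 < i.toNat
            · exact h2 (Or.inl hcase)
            · exact h2 (Or.inr ⟨by omega, by omega⟩)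
          · omega)]
  · intro t s ht hP
    subst hP
    have hjt : (1 + (t:Int)).toNat = t + 1 := by omega
    have := pvLoop3Step seq k i (1 + (t:Int)) hk1 hk2 hi1 hi2 (by omega) (by omega)
    rw [hjt] at this
    rw [show ((1:Int) + (t:Int)).toNat = t + 1 from by omega,
        show ((1:Int) + (t:Int) + 1).toNat = t + 1 + 1 from by omega]
    exact this

theorem pvLoop3 (seq : List Int) (k : Int)
    (hk1 : 1 ≤ k) (hk2 : k < (seq.length:Int)) :
    (PySem.List.pyRange 1 (seq.length:Int) 1).foldl
      (fun (ts : List (List Int) × List (List Int)) (i : Int) =>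
        (PySem.List.pyRange 1 k 1).foldl
          (fun (ts : List (List Int) × List (List Int)) (j : Int) =>
            (pvSet2 ts.1 i j ((PySem.List.min? ((PySem.List.pyRange 0 i 1).map (fun x =>
                (max (pvGet2 ts.1 x (j-1)) (pvGet2 ts.1 i 0 - pvGet2 ts.1 x 0), x))) (fun q => q.1)).getD (0,0)).1,
             pvSet2 ts.2 (i-1) (j-1) ((PySem.List.min? ((PySem.List.pyRange 0 i 1).map (fun x =>
                (max (pvGet2 ts.1 x (j-1)) (pvGet2 ts.1 i 0 - pvGet2 ts.1 x 0), x))) (fun q => q.1)).getD (0,0)).2)) ts)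
      (pvMat seq.length k.toNat (tblG seq 1 1),
       pvMat (seq.length-1) (k.toNat-1) (solG seq 1 1))
    = (pvMat seq.length k.toNat (tblG seq seq.length 1),
       pvMat (seq.length-1) (k.toNat-1) (solG seq seq.length 1)) := by
  set N := seq.length with hN
  set kt := k.toNat with hkt
  have hNN : (1:Int) + ((N-1 : Nat):Int) = (N:Int) := by omega
  have key := pvFoldInv
    (f := (fun (ts : List (List Int) × List (List Int)) (i : Int) =>
        (PySem.List.pyRange 1 k 1).foldl
          (fun (ts : List (List Int) × List (List Int)) (j : Int) =>
            (pvSet2 ts.1 i j ((PySem.List.min? ((PySem.List.pyRange 0 i 1).map (fun x =>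
                (max (pvGet2 ts.1 x (j-1)) (pvGet2 ts.1 i 0 - pvGet2 ts.1 x 0), x))) (fun q => q.1)).getD (0,0)).1,
             pvSet2 ts.2 (i-1) (j-1) ((PySem.List.min? ((PySem.List.pyRange 0 i 1).map (fun x =>
                (max (pvGet2 ts.1 x (j-1)) (pvGet2 ts.1 i 0 - pvGet2 ts.1 x 0), x))) (fun q => q.1)).getD (0,0)).2)) ts))
    (a := 1)
    (P := fun b ts => ts = (pvMat N kt (tblG seq b.toNat 1), pvMat (N-1) (kt-1) (solG seq b.toNat 1)))
    (m := N - 1)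
    (s0 := (pvMat N kt (tblG seq 1 1), pvMat (N-1) (kt-1) (solG seq 1 1)))
    (h0 := by norm_num)
    (hstep := ?_)
  · rw [hNN] at key
    have hNt : ((N:Int)).toNat = N := by omega
    rw [hNt] at key
    exact key
  · intro t s ht hP
    subst hP
    have := pvLoop3Inner seq k (1 + (t:Int)) hk1 hk2 (by omega) (by omega)
    rw [show ((1:Int) + (t:Int)).toNat = t + 1 from by omega] at this
    rw [show ((1:Int) + (t:Int)).toNat = t + 1 from by omega]
    rw [show ((1:Int) + (t:Int) + 1).toNat = t + 1 + 1 from by omega]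
    exact this

theorem pvTableA (seq : List Int) (k : Int) (hk1 : 1 ≤ k) (hk2 : k < (seq.length : Int)) :
    (linear_partition_table seq k).2 = solF seq seq.length k.toNat := by
  have hlen : 2 ≤ seq.length := by omega
  have h0 : linear_partition_table seq k
      = (PySem.List.pyRange 1 (PySem.List.len seq) 1).foldl
          (fun (ts : List (List Int) × List (List Int)) (i : Int) =>
            (PySem.List.pyRange 1 k 1).foldl
              (fun (ts : List (List Int) × List (List Int)) (j : Int) =>
                (pvSet2 ts.1 i j ((PySem.List.min? ((PySem.List.pyRange 0 i 1).map (fun x =>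
                    (max (pvGet2 ts.1 x (j-1)) (pvGet2 ts.1 i 0 - pvGet2 ts.1 x 0), x))) (fun q => q.1)).getD (0,0)).1,
                 pvSet2 ts.2 (i-1) (j-1) ((PySem.List.min? ((PySem.List.pyRange 0 i 1).map (fun x =>
                    (max (pvGet2 ts.1 x (j-1)) (pvGet2 ts.1 i 0 - pvGet2 ts.1 x 0), x))) (fun q => q.1)).getD (0,0)).2)) ts)
          ((PySem.List.pyRange 0 k 1).foldl (fun t j => pvSet2 t 0 j (PySem.List.pyGetD seq 0 0))
            ((PySem.List.pyRange 0 (PySem.List.len seq) 1).foldl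
              (fun t i => pvSet2 t i 0 (PySem.List.pyGetD seq i 0 + (if i ≠ 0 then pvGet2 t (i-1) 0 else 0)))
              ((PySem.List.pyRange 0 (PySem.List.len seq) 1).map (fun _ => List.replicate k.toNat 0))),
           (PySem.List.pyRange 0 (PySem.List.len seq - 1) 1).map (fun _ => List.replicate (k-1).toNat 0)) := rfl
  rw [h0]
  simp only [PySem.List.len_eq]
  rw [pvRepl k.toNat (0:Int), pvConstMap seq.length ((List.range k.toNat).map (fun _ => (0:Int)))]
  rw [pvLoop1 seq k.toNat (by omega)]
  rw [pvLoop2 seq k hk1 (by omega)]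
  rw [show (seq.length:Int) - 1 = ((seq.length - 1 : Nat):Int) from by omega]
  rw [pvRepl (k-1).toNat (0:Int), pvConstMap (seq.length - 1) ((List.range (k-1).toNat).map (fun _ => (0:Int)))]
  have hS0 : (List.range (seq.length - 1)).map (fun (_ : Nat) => (List.range (k-1).toNat).map (fun (_ : Nat) => (0:Int)))
      = pvMat (seq.length - 1) (k.toNat - 1) (solG seq 1 1) := by
    rw [show (k-1).toNat = k.toNat - 1 from by omega]
    unfold pvMat
    apply List.map_congr_left
    intro r hr
    apply List.map_congr_left
    intro c hc
    unfold solG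
    rw [if_neg (by omega)]
  rw [hS0]
  rw [pvLoop3 seq k hk1 hk2]
  show pvMat (seq.length - 1) (k.toNat - 1) (solG seq seq.length 1) = _
  unfold solF pvMat
  apply List.map_congr_left
  intro r hr
  apply List.map_congr_left
  intro c hc
  unfold solG
  rw [if_pos (Or.inl (by
    have := List.mem_range.mp hr
    omega))]

-- ---- reconstruction spec shared by both ports ----
def lastE (M : List (List Int)) : Int → List Int → Int
  | e, [] => e
  | e, j :: js => lastE M (pvGet2 M (e-1) j) js

def blocksA (M : List (List Int)) (src : List Int) : Int → List Int → List (List Int)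
  | _, [] => []
  | e, j :: js =>
    ((PySem.List.pyRange (pvGet2 M (e-1) j + 1) (e+1) 1).map (fun i => PySem.List.pyGetD src i 0))
      :: blocksA M src (pvGet2 M (e-1) j) js

def blocksB (M : List (List Int)) (src : List Int) : Int → List Int → List (List Int)
  | _, [] => []
  | e, j :: js =>
    PySem.List.slice src (some (pvGet2 M (e-1) j + 1)) (some (e+1))
      :: blocksB M src (pvGet2 M (e-1) j) js

theorem pvGet2_bounds (M : List (List Int)) (N : Int) (hN : 2 ≤ N)
    (hM : ∀ row ∈ M, ∀ v ∈ row, 0 ≤ v ∧ v ≤ N - 2) (e j : Int) :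
    0 ≤ pvGet2 M e j ∧ pvGet2 M e j ≤ N - 2 := by
  unfold pvGet2
  have hrow : PySem.List.pyGetD M e [] = [] ∨ PySem.List.pyGetD M e [] ∈ M := by
    by_cases h : PySem.Raise.InRange M.length e
    · exact Or.inr (PySem.List.pyGetD_mem M [] h)
    · exact Or.inl (PySem.List.pyGetD_of_none M e [] ((PySem.List.pyGet?_eq_none_iff M e).mpr h))
  rcases hrow with h | h
  · rw [h]
    have : PySem.List.pyGetD ([] : List Int) j 0 = 0 := by
      apply PySem.List.pyGetD_of_none
      rw [PySem.List.pyGet?_eq_none_iff]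
      intro hcon
      rcases hcon with ⟨h1, h2⟩
      simp at h1 h2
      omega
    rw [this]
    omega
  · have hval : PySem.List.pyGetD (PySem.List.pyGetD M e []) j 0 = 0
        ∨ PySem.List.pyGetD (PySem.List.pyGetD M e []) j 0 ∈ PySem.List.pyGetD M e [] := by
      by_cases h2 : PySem.Raise.InRange (PySem.List.pyGetD M e []).length j
      · exact Or.inr (PySem.List.pyGetD_mem _ 0 h2)
      · exact Or.inl (PySem.List.pyGetD_of_none _ j 0 ((PySem.List.pyGet?_eq_none_iff _ j).mpr h2))
    rcases hval with h2 | h2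
    · rw [h2]; omega
    · exact hM _ h _ h2

theorem pvMapSlice (src : List Int) (a b : Int) (ha : 0 ≤ a) (hb : 0 ≤ b) (hble : b ≤ (src.length:Int)) :
    (PySem.List.pyRange a b 1).map (fun i => PySem.List.pyGetD src i 0)
      = PySem.List.slice src (some a) (some b) := by
  rw [PySem.List.slice_toNat src ha hb]
  rcases le_or_gt a b with hab | hab
  · apply List.ext_getElem
    · simp [PySem.List.length_pyRange_one, List.length_take, List.length_drop]
      omega
    · intro t ht1 ht2
      simp only [List.getElem_map, PySem.List.getElem_pyRange_one]
      rw [List.getElem_take, List.getElem_drop]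
      simp only [List.length_map, PySem.List.length_pyRange_one] at ht1
      rw [PySem.List.pyGetD_eq_getElem src 0 (by omega) (by omega)]
      congr 1
      omega
  · rw [PySem.List.pyRange_one_eq_nil (by omega)]
    simp
    omega

-- A's backtrack fold unrolled into lastE / blocksA
theorem pvFoldA (M : List (List Int)) (src : List Int) (rot : Bool) (js : List Int) :
    ∀ (e : Int) (ans : List (List Int)),
    js.foldl (fun (st : Int × List (List Int)) kk =>
        (pvGet2 M (st.1 - 1) kk,
         if rot then st.2 ++ [(PySem.List.pyRange (pvGet2 M (st.1 - 1) kk + 1) (st.1 + 1) 1).map (fun i => PySem.List.pyGetD src i 0)]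
         else [(PySem.List.pyRange (pvGet2 M (st.1 - 1) kk + 1) (st.1 + 1) 1).map (fun i => PySem.List.pyGetD src i 0)] ++ st.2)) (e, ans)
      = (lastE M e js, if rot then ans ++ blocksA M src e js else (blocksA M src e js).reverse ++ ans) := by
  induction js with
  | nil =>
    intro e ans
    simp [lastE, blocksA]
  | cons j js ih =>
    intro e ans
    rw [List.foldl_cons, ih]
    cases rot <;> simp [lastE, blocksA]

-- B's reconstruction fold unrolled into lastE / blocksB
theorem pvFoldBwalk (M : List (List Int)) (src : List Int) (js : List Int) :
    ∀ (e : Int) (parts : List (List Int)),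
    js.foldl (fun (st : Int × List (List Int)) j =>
        (pvGet2 M (st.1 - 1) j,
         st.2 ++ [PySem.List.slice src (some (pvGet2 M (st.1 - 1) j + 1)) (some (st.1 + 1))])) (e, parts)
      = (lastE M e js, parts ++ blocksB M src e js) := by
  induction js with
  | nil =>
    intro e parts
    simp [lastE, blocksB]
  | cons j js ih =>
    intro e parts
    rw [List.foldl_cons, ih]
    simp [lastE, blocksB]

theorem pvBlocksEq (M : List (List Int)) (src : List Int) (N : Int)
    (hN : 2 ≤ N) (hsrc : (src.length:Int) = N)
    (hM : ∀ row ∈ M, ∀ v ∈ row, 0 ≤ v ∧ v ≤ N - 2) (js : List Int) :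
    ∀ (e : Int), 0 ≤ e → e ≤ N - 1 →
    blocksA M src e js = blocksB M src e js := by
  induction js with
  | nil => intro e he1 he2; rfl
  | cons j js ih =>
    intro e he1 he2
    have hc := pvGet2_bounds M N hN hM (e-1) j
    simp only [blocksA, blocksB]
    rw [pvMapSlice src _ _ (by omega) (by omega) (by omega)]
    rw [ih (pvGet2 M (e-1) j) (by omega) (by omega)]

theorem pvLastE_bounds (M : List (List Int)) (N : Int) (hN : 2 ≤ N)
    (hM : ∀ row ∈ M, ∀ v ∈ row, 0 ≤ v ∧ v ≤ N - 2) (js : List Int) :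
    ∀ (e : Int), 0 ≤ e → e ≤ N - 1 → 0 ≤ lastE M e js ∧ lastE M e js ≤ N - 1 := by
  induction js with
  | nil => intro e he1 he2; exact ⟨he1, he2⟩
  | cons j js ih =>
    intro e he1 he2
    have hc := pvGet2_bounds M N hN hM (e-1) j
    exact ih (pvGet2 M (e-1) j) (by omega) (by omega)

def pvSrc (seq : List Int) (dl : Option (List Int)) : List Int :=
  match dl with
  | none => seq
  | some l => if ((l.length:Int)) ≠ ((seq.length:Int)) then seq else l

theorem pvSrc_len (seq : List Int) (dl : Option (List Int)) :
    ((pvSrc seq dl).length : Int) = (seq.length : Int) := by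
  cases dl with
  | none => rfl
  | some l =>
    simp only [pvSrc]
    by_cases h : ((l.length:Int)) ≠ ((seq.length:Int))
    · rw [if_pos h]
    · rw [if_neg h]
      omega

theorem pvA_main (seq : List Int) (k : Int) (dl : Option (List Int)) (rot : Bool)
    (hk1 : 1 ≤ k) (hk2 : k < (seq.length : Int)) :
    linear_partition seq k dl rot
      = pvBuildA (solF seq seq.length k.toNat) (pvSrc seq dl) k ((seq.length:Int) - 1) rot := by
  unfold linear_partition
  rw [if_neg (by omega)]
  simp only [PySem.List.len_eq]
  rw [if_neg (by omega)]
  rw [pvTableA seq k hk1 hk2]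
  cases dl with
  | none => rfl
  | some l =>
    simp only [pvSrc]
    by_cases h : ((l.length:Int)) ≠ ((seq.length:Int))
    · rw [if_pos h, if_pos h]
    · rw [if_neg h, if_neg h]

-- ---- B: cost recursion = Tc, cut scan = ES ----
theorem pvSumSplit (xs : List Int) (a b : Nat) (h : a ≤ b) :
    ((xs.drop a).take (b - a)).sum = (xs.take b).sum - (xs.take a).sum := by
  have hb : xs.take b = xs.take a ++ (xs.drop a).take (b - a) := by
    have h2 : a + (b - a) = b := by omega
    rw [← h2, List.take_add]
    rw [h2]
  rw [hb, List.sum_append]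
  ring

theorem pvTail0 (seq : List Int) (i : Int) (h1 : 0 ≤ i) :
    (PySem.List.slice seq (some 1) (some (i+1))).sum = preI seq (i+1) - preI seq 1 := by
  rw [PySem.List.slice_toNat seq (by omega) (by omega)]
  unfold preI
  exact pvSumSplit seq ((1:Int)).toNat ((i+1)).toNat (by omega)

theorem pvBCost_eq (seq : List Int) (j : Nat) :
    ∀ (i : Int), 0 ≤ i → i < (seq.length:Int) → bCost seq j i = Tc seq j i := by
  induction j with
  | zero =>
    intro i h1 h2
    show (PySem.List.slice seq none (some (i+1))).sum = preI seq (i+1)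
    rw [PySem.List.slice_to seq (by omega)]
    rfl
  | succ j ih =>
    intro i h1 h2
    by_cases hi0 : i = 0
    · subst hi0
      show (if (0:Int) = 0 then PySem.List.pyGetD seq 0 0 else _) = Tc seq (j+1) 0
      rw [if_pos rfl, pvTc_zero_col]
      rw [PySem.List.pyGetD_eq_getElem seq 0 (by omega) (by omega)]
      rw [pvPreI_one seq (by omega)]
      rfl
    · have hi1 : 1 ≤ i := by omega
      show (if i = 0 then _ else
        ((PySem.List.pyRange 1 i 1).foldl (fun (st : Int × Int) x =>
            let tail := st.1 - PySem.List.pyGetD seq x 0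
            let v := max (bCost seq j x) tail
            (tail, if v < st.2 then v else st.2))
          ((PySem.List.slice seq (some 1) (some (i+1))).sum,
           max (bCost seq j 0) (PySem.List.slice seq (some 1) (some (i+1))).sum)).2) = Tc seq (j+1) i
      rw [if_neg hi0]
      have hm : i = 1 + (((i-1).toNat : Nat) : Int) := by omega
      have key := pvFoldInv
        (f := fun (st : Int × Int) x =>
            let tail := st.1 - PySem.List.pyGetD seq x 0
            let v := max (bCost seq j x) tail
            (tail, if v < st.2 then v else st.2))
        (a := 1)
        (P := fun b st => st.1 = preI seq (i+1) - preI seq b ∧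
           st.2 = ((PySem.List.pyRange 1 b 1).foldl
             (fun (p : Int × Int) x =>
               let v := max (Tc seq j x) (preI seq (i+1) - preI seq (x+1)); if v < p.1 then (v, x) else p)
             (max (Tc seq j 0) (preI seq (i+1) - preI seq 1), 0)).1)
        (m := (i-1).toNat)
        (s0 := ((PySem.List.slice seq (some 1) (some (i+1))).sum,
                max (bCost seq j 0) (PySem.List.slice seq (some 1) (some (i+1))).sum))
        (h0 := by
          constructor
          · exact pvTail0 seq i (by omega)
          · rw [PySem.List.pyRange_one_eq_nil (le_refl 1), List.foldl_nil]
            rw [pvTail0 seq i (by omega), ih 0 (by omega) (by omega)])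
        (hstep := ?_)
      · rw [← hm] at key
        rw [key.2]
        rw [pvTc_succ seq j i hi0]
        rfl
      · intro t st ht hP
        set x : Int := 1 + (t:Int) with hx
        have hx1 : 1 ≤ x := by omega
        have hx2 : x < (seq.length:Int) := by omega
        have htail : st.1 - PySem.List.pyGetD seq x 0 = preI seq (i+1) - preI seq (x+1) := by
          rw [hP.1]
          rw [PySem.List.pyGetD_eq_getElem seq 0 (by omega) (by omega)]
          have hxx : x = ((x.toNat : Nat) : Int) := by omega
          have := pvPreI_succ seq x.toNat (by omega)
          rw [← hxx] at this
          omega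
        constructor
        · exact htail
        · dsimp only
          rw [htail]
          rw [show x + 1 = (1 + (t:Int)) + 1 from by omega] at *
          rw [PySem.List.pyRange_one_succ_right (by omega : (1:Int) ≤ 1 + (t:Int)), List.foldl_append, List.foldl_cons, List.foldl_nil]
          rw [ih x (by omega) (by omega)]
          rw [hP.2]
          dsimp only
          rw [show (1:Int) + (t:Int) = x from rfl, show x + 1 = (1 + (t:Int)) + 1 from by omega]
          by_cases hc : max (Tc seq j x) (preI seq (i+1) - preI seq (1 + (t:Int) + 1)) <
              ((PySem.List.pyRange 1 x 1).foldl
                (fun (p : Int × Int) x =>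
                  let v := max (Tc seq j x) (preI seq (i+1) - preI seq (x+1)); if v < p.1 then (v, x) else p)
                (max (Tc seq j 0) (preI seq (i+1) - preI seq 1), 0)).1
          · rw [if_pos hc, if_pos hc]
          · rw [if_neg hc, if_neg hc]

theorem pvBCut_eq (seq : List Int) (j : Nat) (i : Int)
    (hi1 : 1 ≤ i) (hi2 : i < (seq.length:Int)) :
    bCut seq i j = ES seq j i := by
  unfold bCut
  have hm : i = 1 + (((i-1).toNat : Nat) : Int) := by omega
  have key := pvFoldInv
    (f := fun (st : Int × Int × Int) x =>
        let tail := st.1 - PySem.List.pyGetD seq x 0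
        let v := max (bCost seq j x) tail
        if v < st.2.1 then (tail, v, x) else (tail, st.2.1, st.2.2))
    (a := 1)
    (P := fun b st => st.1 = preI seq (i+1) - preI seq b ∧
       (st.2.1, st.2.2) = (PySem.List.pyRange 1 b 1).foldl
         (fun (p : Int × Int) x =>
           let v := max (Tc seq j x) (preI seq (i+1) - preI seq (x+1)); if v < p.1 then (v, x) else p)
         (max (Tc seq j 0) (preI seq (i+1) - preI seq 1), 0))
    (m := (i-1).toNat)
    (s0 := ((PySem.List.slice seq (some 1) (some (i+1))).sum,
            max (bCost seq j 0) (PySem.List.slice seq (some 1) (some (i+1))).sum, 0))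
    (h0 := by
      constructor
      · exact pvTail0 seq i (by omega)
      · rw [PySem.List.pyRange_one_eq_nil (le_refl 1), List.foldl_nil]
        rw [pvTail0 seq i (by omega), pvBCost_eq seq j 0 (by omega) (by omega)])
    (hstep := ?_)
  · rw [← hm] at key
    have h2 := key.2
    have : ((PySem.List.pyRange 1 i 1).foldl
        (fun (st : Int × Int × Int) x =>
          let tail := st.1 - PySem.List.pyGetD seq x 0
          let v := max (bCost seq j x) tail
          if v < st.2.1 then (tail, v, x) else (tail, st.2.1, st.2.2))
        ((PySem.List.slice seq (some 1) (some (i+1))).sum,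
         max (bCost seq j 0) (PySem.List.slice seq (some 1) (some (i+1))).sum, 0)).2.2
        = ((PySem.List.pyRange 1 i 1).foldl
         (fun (p : Int × Int) x =>
           let v := max (Tc seq j x) (preI seq (i+1) - preI seq (x+1)); if v < p.1 then (v, x) else p)
         (max (Tc seq j 0) (preI seq (i+1) - preI seq 1), 0)).2 := by
      have := congrArg Prod.snd h2
      simpa using this
    rw [this]
    rfl
  · intro t st ht hP
    set x : Int := 1 + (t:Int) with hx
    have hx1 : 1 ≤ x := by omega
    have hx2 : x < (seq.length:Int) := by omega
    have htail : st.1 - PySem.List.pyGetD seq x 0 = preI seq (i+1) - preI seq (x+1) := by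
      rw [hP.1]
      rw [PySem.List.pyGetD_eq_getElem seq 0 (by omega) (by omega)]
      have hxx : x = ((x.toNat : Nat) : Int) := by omega
      have := pvPreI_succ seq x.toNat (by omega)
      rw [← hxx] at this
      omega
    have hrng : PySem.List.pyRange 1 (1 + (t:Int) + 1) 1 = PySem.List.pyRange 1 (1 + (t:Int)) 1 ++ [1 + (t:Int)] :=
      PySem.List.pyRange_one_succ_right (by omega)
    dsimp only
    rw [htail, pvBCost_eq seq j x (by omega) (by omega)]
    rw [hrng, List.foldl_append, List.foldl_cons, List.foldl_nil]
    rw [← hP.2]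
    dsimp only
    rw [show (1:Int) + (t:Int) = x from rfl]
    by_cases hc : max (Tc seq j x) (preI seq (i+1) - preI seq (x + 1)) < st.2.1
    · rw [if_pos hc, if_pos hc]
      exact ⟨rfl, rfl⟩
    · rw [if_neg hc, if_neg hc]
      exact ⟨rfl, rfl⟩

theorem pvRangeMap {α : Type} (a : Int) (m : Nat) (f : Int → α) :
    (PySem.List.pyRange a (a + (m:Int)) 1).map f = (List.range m).map (fun (t : Nat) => f (a + (t:Int))) := by
  apply List.ext_getElem
  · simp [PySem.List.length_pyRange_one]
  · intro t h1 h2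
    simp [PySem.List.getElem_pyRange_one]

theorem pvCutMat (seq : List Int) (k : Int) (hk1 : 1 ≤ k) (hk2 : k < (seq.length:Int)) :
    (PySem.List.pyRange 1 (seq.length:Int) 1).map (fun i =>
        (PySem.List.pyRange 0 (k-1) 1).map (fun j => bCut seq i j.toNat))
      = solF seq seq.length k.toNat := by
  rw [show (seq.length:Int) = 1 + ((seq.length - 1 : Nat):Int) from by omega]
  rw [pvRangeMap]
  unfold solF
  apply List.map_congr_left
  intro r hr
  have hr' := List.mem_range.mp hr
  rw [show k - 1 = 0 + ((k.toNat - 1 : Nat):Int) from by omega]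
  rw [pvRangeMap]
  apply List.map_congr_left
  intro c hc
  have hc' := List.mem_range.mp hc
  rw [show ((0:Int) + (c:Int)).toNat = c from by omega]
  rw [pvBCut_eq seq c (1 + (r:Int)) (by omega) (by omega)]
  rw [show (1:Int) + (r:Int) = (r:Int) + 1 from by omega]

theorem pvB_main (seq : List Int) (k : Int) (dl : Option (List Int)) (rot : Bool)
    (hk1 : 1 ≤ k) (hk2 : k < (seq.length : Int)) :
    linear_partition_alt seq k dl rot
      = (let st := (PySem.List.pyRange (k-2) (-1) (-1)).foldl
            (fun (st : Int × List (List Int)) j =>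
              (pvGet2 (solF seq seq.length k.toNat) (st.1 - 1) j,
               st.2 ++ [PySem.List.slice (pvSrc seq dl) (some (pvGet2 (solF seq seq.length k.toNat) (st.1 - 1) j + 1)) (some (st.1 + 1))]))
            ((seq.length:Int) - 1, []);
         let parts := st.2 ++ [PySem.List.slice (pvSrc seq dl) none (some (st.1 + 1))];
         if rot then parts else parts.reverse) := by
  have h0 : linear_partition_alt seq k dl rot
      = (if k ≤ 0 then []
         else if k ≥ PySem.List.len seq then seq.map (fun x => [x])
         else
           let cut : List (List Int) := (PySem.List.pyRange 1 (PySem.List.len seq) 1).map (fun i =>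
               (PySem.List.pyRange 0 (k-1) 1).map (fun j => bCut seq i j.toNat))
           let src := match dl with
             | none => seq
             | some l => if PySem.List.len l ≠ PySem.List.len seq then seq else l
           let st := (PySem.List.pyRange (k-2) (-1) (-1)).foldl
               (fun (st : Int × List (List Int)) j =>
                 (pvGet2 cut (st.1 - 1) j,
                  st.2 ++ [PySem.List.slice src (some (pvGet2 cut (st.1 - 1) j + 1)) (some (st.1 + 1))]))
               (PySem.List.len seq - 1, [])
           let parts := st.2 ++ [PySem.List.slice src none (some (st.1 + 1))]
           if rot then parts else parts.reverse) := rfl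
  rw [h0]
  simp only [PySem.List.len_eq]
  rw [if_neg (by omega), if_neg (by omega)]
  rw [pvCutMat seq k hk1 hk2]
  cases dl with
  | none => rfl
  | some l =>
    show (let src := if ((l.length:Int)) ≠ ((seq.length:Int)) then seq else l; _) = _
    simp only [pvSrc]
    by_cases h : ((l.length:Int)) ≠ ((seq.length:Int))
    · rw [if_pos h, if_pos h]
    · rw [if_neg h, if_neg h]

-- ===== VERDICT (by name: the statement is the Claim_ definition above) =====
theorem linear_partition_spec : Claim_equal_linear_partition := by
  intro seq k dl rot hdom
  unfold Spec_linear_partition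
  by_cases hk : k ≤ 0
  · unfold linear_partition linear_partition_alt
    rw [if_pos hk, if_pos hk]
  · by_cases hk2 : k < (seq.length:Int)
    case neg =>
      -- k ≥ len(seq): A's lazy map of singletons, B's list of singletons
      unfold linear_partition linear_partition_alt
      rw [if_neg hk, if_neg hk]
      simp only [PySem.List.len_eq]
      rw [if_pos (by omega), if_pos (by omega)]
    have hk1 : 1 ≤ k := by omega
    have hN2 : 2 ≤ (seq.length:Int) := by omega
    have hsl : (((pvSrc seq dl).length):Int) = (seq.length:Int) := pvSrc_len seq dl
    have hMb : ∀ row ∈ solF seq seq.length k.toNat, ∀ v ∈ row, 0 ≤ v ∧ v ≤ (seq.length:Int) - 2 :=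
      pvSolF_bounds seq seq.length k.toNat (by omega)
    have hA : pvBuildA (solF seq seq.length k.toNat) (pvSrc seq dl) k ((seq.length:Int) - 1) rot
        = (if rot
           then blocksA (solF seq seq.length k.toNat) (pvSrc seq dl) ((seq.length:Int) - 1) (PySem.List.pyRange (k-2) (-1) (-1))
                ++ [(PySem.List.pyRange 0 (lastE (solF seq seq.length k.toNat) ((seq.length:Int) - 1) (PySem.List.pyRange (k-2) (-1) (-1)) + 1) 1).map (fun i => PySem.List.pyGetD (pvSrc seq dl) i 0)]
           else [(PySem.List.pyRange 0 (lastE (solF seq seq.length k.toNat) ((seq.length:Int) - 1) (PySem.List.pyRange (k-2) (-1) (-1)) + 1) 1).map (fun i => PySem.List.pyGetD (pvSrc seq dl) i 0)]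
                ++ (blocksA (solF seq seq.length k.toNat) (pvSrc seq dl) ((seq.length:Int) - 1) (PySem.List.pyRange (k-2) (-1) (-1))).reverse) := by
      unfold pvBuildA
      rw [pvFoldA (solF seq seq.length k.toNat) (pvSrc seq dl) rot (PySem.List.pyRange (k-2) (-1) (-1)) ((seq.length:Int) - 1) []]
      cases rot <;> simp
    rw [pvA_main seq k dl rot hk1 hk2, pvB_main seq k dl rot hk1 hk2, hA]
    rw [pvFoldBwalk (solF seq seq.length k.toNat) (pvSrc seq dl) (PySem.List.pyRange (k-2) (-1) (-1)) ((seq.length:Int) - 1) []]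
    have hblocks : blocksA (solF seq seq.length k.toNat) (pvSrc seq dl) ((seq.length:Int) - 1) (PySem.List.pyRange (k-2) (-1) (-1))
        = blocksB (solF seq seq.length k.toNat) (pvSrc seq dl) ((seq.length:Int) - 1) (PySem.List.pyRange (k-2) (-1) (-1)) :=
      pvBlocksEq (solF seq seq.length k.toNat) (pvSrc seq dl) (seq.length:Int) hN2 hsl hMb _ ((seq.length:Int) - 1) (by omega) (by omega)
    have hlE := pvLastE_bounds (solF seq seq.length k.toNat) (seq.length:Int) hN2 hMb (PySem.List.pyRange (k-2) (-1) (-1)) ((seq.length:Int) - 1) (by omega) (by omega)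
    have hrow : (PySem.List.pyRange 0 (lastE (solF seq seq.length k.toNat) ((seq.length:Int) - 1) (PySem.List.pyRange (k-2) (-1) (-1)) + 1) 1).map (fun i => PySem.List.pyGetD (pvSrc seq dl) i 0)
        = PySem.List.slice (pvSrc seq dl) none (some (lastE (solF seq seq.length k.toNat) ((seq.length:Int) - 1) (PySem.List.pyRange (k-2) (-1) (-1)) + 1)) := by
      rw [pvMapSlice (pvSrc seq dl) 0 _ (by omega) (by omega) (by omega)]
      rw [PySem.List.slice_zero_start]
    rw [hblocks, hrow]
    cases rot <;> simp
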